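-- pv_equiv track=rewrite | github.com/kwakjeeyoon/Algorithm | 구현/[프로그래머스]신고 결과 받기.py | solution
-- ===== SOURCE A (Python) =====
-- from collections import defaultdict
--
-- def solution(id_list, report, k):
--     answer = []
--     bad = defaultdict(int)
--     good = defaultdict(int)
--     for command in set(report):
--         start, end = command.split()
--         bad[end] += 1
--     for command in set(report):
--         start, end = command.split()
--         if bad[end] >= k:
--             good[start] += 1
--     for id_num in id_list:
--         answer.append(good[id_num])
--     return answer
-- ===== SOURCE B (Python) =====
-- from collections import defaultdict
--
-- def solution(id_list, report, k):
--     targets = defaultdict(list)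
--     cnt = defaultdict(int)
--     for command in set(report):
--         start, end = command.split()
--         targets[start].append(end)
--         cnt[end] += 1
--     return [sum(1 for t in targets[i] if cnt[t] >= k) for i in id_list]
-- ===== Notes on version B (the rewrite author's own statement) =====
-- stated objective: simpler
-- what changed: Replaces A's second full scan of set(report) (building 'good') by a single pass that also groups targets per reporter, answering each id by counting its own targets with count >= k.
import Mathlib
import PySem

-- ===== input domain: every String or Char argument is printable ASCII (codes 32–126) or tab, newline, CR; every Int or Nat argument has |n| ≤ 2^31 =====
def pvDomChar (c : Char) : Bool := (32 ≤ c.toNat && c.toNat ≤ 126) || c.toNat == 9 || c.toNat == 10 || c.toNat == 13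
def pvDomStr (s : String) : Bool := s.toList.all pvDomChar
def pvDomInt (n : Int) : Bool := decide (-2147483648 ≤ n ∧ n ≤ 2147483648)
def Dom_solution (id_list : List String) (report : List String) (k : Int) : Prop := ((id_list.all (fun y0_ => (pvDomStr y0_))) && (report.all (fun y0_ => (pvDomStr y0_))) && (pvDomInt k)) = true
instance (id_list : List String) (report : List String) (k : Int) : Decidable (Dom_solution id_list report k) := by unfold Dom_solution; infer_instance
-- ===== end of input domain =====

-- B does the work in one pass (grouping targets per reporter) instead of A's two scans; objective: simpler.

-- shared helper: 'start, end = command.split()' (none = unpacking would raise ValueError)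
def pvSplit2 (c : String) : Option (String × String) :=
  match PySem.Str.split₀ c with
  | [s, e] => some (s, e)
  | _ => none

-- ===== PORT A =====
def badStep (d : PySem.Dict String Int) (c : String) : PySem.Dict String Int :=
  match pvSplit2 c with
  | some (_, e) => d.modify e 0 (· + 1)
  | none => d

def goodStep (bad : PySem.Dict String Int) (k : Int) (d : PySem.Dict String Int) (c : String) : PySem.Dict String Int :=
  match pvSplit2 c with
  | some (st, e) => if k ≤ bad.getD e 0 then d.modify st 0 (· + 1) else d
  | none => d

def solution (id_list : List String) (report : List String) (k : Int) : List Int :=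
  let s := PySem.Set.ofList report
  let bad := s.foldl badStep PySem.Dict.empty
  let good := s.foldl (goodStep bad k) PySem.Dict.empty
  id_list.map (fun i => good.getD i 0)

-- ===== PORT B =====
def bStep (acc : PySem.Dict String (List String) × PySem.Dict String Int) (c : String) :
    PySem.Dict String (List String) × PySem.Dict String Int :=
  match pvSplit2 c with
  | some (st, e) => (acc.1.modify st [] (· ++ [e]), acc.2.modify e 0 (· + 1))
  | none => acc

def solution_alt (id_list : List String) (report : List String) (k : Int) : List Int :=
  let s := PySem.Set.ofList report
  let p := s.foldl bStep (PySem.Dict.empty, PySem.Dict.empty)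
  id_list.map (fun i => ((p.1.getD i []).countP (fun t => decide (k ≤ p.2.getD t 0)) : Int))

-- ===== PRECONDITION & SPEC =====
-- Pre_ excludes exactly the inputs where Python A raises ValueError: a report entry whose split() has not exactly two tokens.
def Pre_solution (id_list : List String) (report : List String) (k : Int) : Prop :=
  ∀ c ∈ report, (PySem.Str.split₀ c).length = 2
instance (id_list : List String) (report : List String) (k : Int) : Decidable (Pre_solution id_list report k) := by unfold Pre_solution; infer_instance

def pvWitness_solution : List String × List String × Int := (["a", "b"], ["a b", "b a"], 1)

def Spec_solution (id_list : List String) (report : List String) (k : Int) (out : List Int) : Prop := out = solution_alt id_list report k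
instance (id_list : List String) (report : List String) (k : Int) (out : List Int) : Decidable (Spec_solution id_list report k out) := by unfold Spec_solution; infer_instance

-- ===== CLAIM (what is proved, stated in full; the proofs are below) =====
def Claim_equal_solution : Prop := ∀ (id_list : List String) (report : List String) (k : Int), Dom_solution id_list report k → Pre_solution id_list report k → Spec_solution id_list report k (solution id_list report k)

-- ===== LEMMAS AND PROOFS =====

def tStep (d : PySem.Dict String (List String)) (c : String) : PySem.Dict String (List String) :=
  match pvSplit2 c with
  | some (st, e) => d.modify st [] (· ++ [e])
  | none => d

-- B's pair fold is the pair of the two independent folds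
theorem bfold_pair (l : List String) (a : PySem.Dict String (List String)) (b : PySem.Dict String Int) :
    l.foldl bStep (a, b) = (l.foldl tStep a, l.foldl badStep b) := by
  induction l generalizing a b with
  | nil => rfl
  | cons c t ih =>
    simp only [List.foldl_cons]
    cases h : pvSplit2 c with
    | none => simp [bStep, tStep, badStep, h, ih]
    | some p => cases p with
      | mk st e => simp [bStep, tStep, badStep, h, ih]

-- main invariant: A's 'good' counter agrees with counting B's grouped targets
theorem good_eq_count (bad : PySem.Dict String Int) (k : Int) (l : List String)
    (g : PySem.Dict String Int) (m : PySem.Dict String (List String))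
    (inv : ∀ i, g.getD i 0 = ((m.getD i []).countP (fun t => decide (k ≤ bad.getD t 0)) : Int)) :
    ∀ i, (l.foldl (goodStep bad k) g).getD i 0
        = (((l.foldl tStep m).getD i []).countP (fun t => decide (k ≤ bad.getD t 0)) : Int) := by
  induction l generalizing g m with
  | nil => exact inv
  | cons c t ih =>
    simp only [List.foldl_cons]
    cases h : pvSplit2 c with
    | none =>
      simp only [goodStep, tStep, h]
      exact ih g m inv
    | some p =>
      obtain ⟨st, e⟩ := p
      simp only [goodStep, tStep, h]
      by_cases hk : k ≤ bad.getD e 0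
      · simp only [if_pos hk]
        refine ih _ _ (fun i => ?_)
        rw [PySem.Dict.getD_modify, PySem.Dict.getD_modify]
        by_cases hi : i = st
        · simp [hi, inv st, List.countP_append, hk]
        · simp [hi, inv i]
      · simp only [if_neg hk]
        refine ih g _ (fun i => ?_)
        rw [PySem.Dict.getD_modify]
        by_cases hi : i = st
        · simp [hi, inv st, List.countP_append, hk]
        · simp [hi, inv i]

-- ===== VERDICT (by name: the statement is the Claim_ definition above) =====
theorem solution_spec : Claim_equal_solution := by
  intro id_list report k _ _
  unfold Spec_solution solution solution_alt
  simp only [bfold_pair]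
  refine List.map_congr_left (fun i _ => ?_)
  exact good_eq_count _ k (PySem.Set.ofList report) PySem.Dict.empty PySem.Dict.empty
    (fun i => by simp [PySem.Dict.getD_empty]) i
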